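-- pv_equiv track=rewrite | github.com/ChahelPaatur/Self-Modifying-Program-Synthesis-via-Online-Library-Evolution | common/object_ops.py | place_object
-- ===== SOURCE A (Python) =====
-- from typing import List, Dict, Tuple, Set, Optional
--
-- Grid = List[List[int]]
--
-- def place_object(grid: Grid, component: Set[Tuple[int, int]], offset_r: int, offset_c: int, source_grid: Grid) -> Grid:
--     """Place object at new position with offset"""
--     result = [row[:] for row in grid]
--     h, w = len(grid), len(grid[0])
--
--     for r, c in component:
--         new_r, new_c = r + offset_r, c + offset_c
--         if 0 <= new_r < h and 0 <= new_c < w: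
--             result[new_r][new_c] = source_grid[r][c]
--
--     return result
-- ===== SOURCE B (Python) =====
-- def place_object(grid, component, offset_r, offset_c, source_grid):
--     """Place object at new position: per-cell inverse lookup instead of
--     copy-then-mutate (the shift is injective, so (i-offset_r, j-offset_c)
--     is the unique cell that could write (i, j))."""
--     w = len(grid[0])
--     return [
--         [source_grid[i - offset_r][j - offset_c]
--          if j < w and (i - offset_r, j - offset_c) in component
--          else v
--          for j, v in enumerate(row)]
--         for i, row in enumerate(grid)
--     ]
-- ===== Notes on version B (the rewrite author's own statement) =====
-- stated objective: alternative
-- what changed: B inverts the mapping: instead of copying the grid and mutating each shifted target, it builds every output cell directly by an inverse lookup -- cell (i,j) takes source_grid[i-offset_r][j-offset_c] when j < w and (i-offset_r, j-offset_c) is in the component set (the shift is injective, so that is the unique possible writer), otherwise grid[i][j].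
import Mathlib
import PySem

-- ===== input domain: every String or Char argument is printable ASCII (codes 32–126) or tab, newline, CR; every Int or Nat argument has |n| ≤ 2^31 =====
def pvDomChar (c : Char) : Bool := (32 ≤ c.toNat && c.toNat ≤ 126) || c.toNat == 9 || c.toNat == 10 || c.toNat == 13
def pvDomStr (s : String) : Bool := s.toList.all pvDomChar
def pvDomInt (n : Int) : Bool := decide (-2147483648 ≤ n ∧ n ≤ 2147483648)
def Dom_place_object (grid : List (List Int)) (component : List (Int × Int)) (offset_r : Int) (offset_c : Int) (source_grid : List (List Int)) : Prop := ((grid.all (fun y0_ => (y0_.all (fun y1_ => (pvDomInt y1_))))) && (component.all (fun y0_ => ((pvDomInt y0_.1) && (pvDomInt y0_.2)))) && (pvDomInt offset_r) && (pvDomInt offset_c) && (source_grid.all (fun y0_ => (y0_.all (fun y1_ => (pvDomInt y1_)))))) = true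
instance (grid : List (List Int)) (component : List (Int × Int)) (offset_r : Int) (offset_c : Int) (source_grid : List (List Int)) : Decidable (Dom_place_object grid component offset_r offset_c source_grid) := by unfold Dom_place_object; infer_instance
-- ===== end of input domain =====

-- B replaces A's copy-then-mutate loop over the component by a direct per-cell
-- inverse lookup (the shift is injective, so each output cell has a unique possible
-- writer): an alternative decomposition of similar cost.

-- ===== PORT A =====
-- loop body of A: for (r, c) in component, overwrite the shifted cell in place
-- when the target is in bounds (result[new_r][new_c] = source_grid[r][c]).
def pvStepA (source_grid : List (List Int)) (offset_r offset_c h w : Int)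
    (res : List (List Int)) (rc : Int × Int) : List (List Int) :=
  let new_r := rc.1 + offset_r
  let new_c := rc.2 + offset_c
  if 0 ≤ new_r ∧ new_r < h ∧ 0 ≤ new_c ∧ new_c < w then
    res.modify new_r.toNat (fun row =>
      row.set new_c.toNat ((PySem.List.pyGet? ((PySem.List.pyGet? source_grid rc.1).getD []) rc.2).getD 0))
  else res

-- literal transliteration of A: copy the grid, then fold the loop body over component.
def place_object (grid : List (List Int)) (component : List (Int × Int)) (offset_r : Int) (offset_c : Int) (source_grid : List (List Int)) : List (List Int) :=
  let result := grid.map (fun row => row)       -- result = [row[:] for row in grid]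
  let h : Int := grid.length
  let w : Int := (grid.headD []).length         -- len(grid[0]); Pre_ excludes grid = []
  component.foldl (pvStepA source_grid offset_r offset_c h w) result

-- ===== PORT B =====
-- literal transliteration of B: nested enumerate comprehension; each cell (i, j)
-- takes source_grid[i-offset_r][j-offset_c] when j < w and the inverse-shifted
-- coordinate is in the component, else the original value.
def place_object_alt (grid : List (List Int)) (component : List (Int × Int)) (offset_r : Int) (offset_c : Int) (source_grid : List (List Int)) : List (List Int) :=
  let w : Int := (grid.headD []).length         -- len(grid[0]); Pre_ excludes grid = []
  (PySem.List.enumerate grid).map (fun p =>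
    (PySem.List.enumerate p.2).map (fun q =>
      let src := (p.1 - offset_r, q.1 - offset_c)
      if q.1 < w ∧ src ∈ component then
        (PySem.List.pyGet? ((PySem.List.pyGet? source_grid src.1).getD []) src.2).getD 0
      else q.2))

-- ===== PRECONDITION & SPEC =====
-- Pre_ excludes exactly the inputs where the Python A raises: the empty grid
-- (len(grid[0]) is an IndexError), component cells whose in-bounds target needs a
-- source_grid[r][c] read that is out of range, and in-bounds targets whose result row
-- is shorter than len(grid[0]) so the write result[new_r][new_c] is an IndexError.
def Pre_place_object (grid : List (List Int)) (component : List (Int × Int)) (offset_r : Int) (offset_c : Int) (source_grid : List (List Int)) : Prop :=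
  grid ≠ [] ∧ ∀ rc ∈ component,
    (0 ≤ rc.1 + offset_r ∧ rc.1 + offset_r < (grid.length : Int) ∧
     0 ≤ rc.2 + offset_c ∧ rc.2 + offset_c < ((grid.headD []).length : Int)) →
      (PySem.Raise.InRange source_grid.length rc.1 ∧
       PySem.Raise.InRange ((PySem.List.pyGet? source_grid rc.1).getD []).length rc.2 ∧
       rc.2 + offset_c < ((grid.getD (rc.1 + offset_r).toNat []).length : Int))
instance (grid : List (List Int)) (component : List (Int × Int)) (offset_r : Int) (offset_c : Int) (source_grid : List (List Int)) : Decidable (Pre_place_object grid component offset_r offset_c source_grid) := by unfold Pre_place_object; infer_instance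

def pvWitness_place_object : List (List Int) × (List (Int × Int)) × Int × Int × List (List Int) :=
  ([[1, 2], [3, 4]], [(0, 0), (1, 1)], 1, 0, [[5, 6], [7, 8]])

def Spec_place_object (grid : List (List Int)) (component : List (Int × Int)) (offset_r : Int) (offset_c : Int) (source_grid : List (List Int)) (out : List (List Int)) : Prop := out = place_object_alt grid component offset_r offset_c source_grid
instance (grid : List (List Int)) (component : List (Int × Int)) (offset_r : Int) (offset_c : Int) (source_grid : List (List Int)) (out : List (List Int)) : Decidable (Spec_place_object grid component offset_r offset_c source_grid out) := by unfold Spec_place_object; infer_instance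

-- ===== CLAIM (what is proved, stated in full; the proofs are below) =====
def Claim_equal_place_object : Prop := ∀ (grid : List (List Int)) (component : List (Int × Int)) (offset_r : Int) (offset_c : Int) (source_grid : List (List Int)), Dom_place_object grid component offset_r offset_c source_grid → Pre_place_object grid component offset_r offset_c source_grid → Spec_place_object grid component offset_r offset_c source_grid (place_object grid component offset_r offset_c source_grid)

-- ===== LEMMAS AND PROOFS =====

-- the value A writes at target (i, j) / B reads for cell (i, j)
def pvVal (source_grid : List (List Int)) (offset_r offset_c : Int) (i j : Nat) : Int :=
  (PySem.List.pyGet? ((PySem.List.pyGet? source_grid ((i : Int) - offset_r)).getD []) ((j : Int) - offset_c)).getD 0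

-- total cell access, to state pointwise lemmas without dependent index proofs
def pvCell (l : List (List Int)) (i j : Nat) : Int := ((l[i]?.getD [])[j]?.getD 0)

theorem pvCell_eq (l : List (List Int)) (i j : Nat) (hi : i < l.length) (hj : j < (l[i]).length) :
    pvCell l i j = (l[i])[j] := by
  simp [pvCell, List.getElem?_eq_getElem hi, List.getElem?_eq_getElem hj]

theorem pvStepA_length (sg : List (List Int)) (or oc h w : Int) (res : List (List Int)) (rc : Int × Int) :
    (pvStepA sg or oc h w res rc).length = res.length := by
  unfold pvStepA; dsimp only; split <;> simp

theorem pvFoldA_length (sg : List (List Int)) (or oc h w : Int) (cs : List (Int × Int)) (init : List (List Int)) :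
    (cs.foldl (pvStepA sg or oc h w) init).length = init.length := by
  induction cs generalizing init with
  | nil => rfl
  | cons rc cs ih => rw [List.foldl_cons, ih, pvStepA_length]

theorem pvStepA_row (sg : List (List Int)) (or oc h w : Int) (res : List (List Int)) (rc : Int × Int)
    (i : Nat) : ((pvStepA sg or oc h w res rc)[i]?.getD []).length = (res[i]?.getD []).length := by
  unfold pvStepA; dsimp only; split
  · rw [List.getElem?_modify]
    cases res[i]? with
    | none => rfl
    | some v => simp [apply_ite List.length]
  · rfl

theorem pvFoldA_row (sg : List (List Int)) (or oc h w : Int) (cs : List (Int × Int)) (init : List (List Int))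
    (i : Nat) : (((cs.foldl (pvStepA sg or oc h w) init))[i]?.getD []).length = (init[i]?.getD []).length := by
  induction cs generalizing init with
  | nil => rfl
  | cons rc cs ih => rw [List.foldl_cons, ih, pvStepA_row]

-- one step of A, read back pointwise
theorem pvStepA_cell (sg : List (List Int)) (or oc h w : Int) (init : List (List Int)) (rc : Int × Int)
    (i j : Nat) (hi : i < init.length) (hj : j < (init[i]?.getD []).length) :
    pvCell (pvStepA sg or oc h w init rc) i j =
      if rc = ((i : Int) - or, (j : Int) - oc) ∧ (i : Int) < h ∧ (j : Int) < w then pvVal sg or oc i j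
      else pvCell init i j := by
  obtain ⟨r, c⟩ := rc
  have hrow : init[i]?.getD [] = init[i]'hi := by rw [List.getElem?_eq_getElem hi]; rfl
  unfold pvStepA pvCell
  dsimp only
  by_cases hg : 0 ≤ r + or ∧ r + or < h ∧ 0 ≤ c + oc ∧ c + oc < w
  · rw [if_pos hg, List.getElem?_modify]
    by_cases h1 : (r + or).toNat = i
    · simp only [h1, if_true]
      rw [List.getElem?_eq_getElem hi]
      simp only [Option.map_eq_map, Option.map_some, Option.getD_some]
      simp only [List.getElem?_eq_getElem hi, Option.getD_some] at hj
      by_cases h2 : (c + oc).toNat = j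
      · have hr : r = (i : Int) - or := by omega
        have hc : c = (j : Int) - oc := by omega
        have hcond : ((r, c) : Int × Int) = ((i : Int) - or, (j : Int) - oc) ∧ (i : Int) < h ∧ (j : Int) < w := by
          exact ⟨by rw [hr, hc], by omega, by omega⟩
        rw [if_pos hcond]
        have hjs : j < ((init[i]'hi).set (c + oc).toNat ((PySem.List.pyGet? ((PySem.List.pyGet? sg r).getD []) c).getD 0)).length := by
          simpa using hj
        rw [List.getElem?_eq_getElem hjs, Option.getD_some, List.getElem_set, if_pos h2]
        rw [hr, hc]; rfl
      · have hcond : ¬ (((r, c) : Int × Int) = ((i : Int) - or, (j : Int) - oc) ∧ (i : Int) < h ∧ (j : Int) < w) := by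
          rintro ⟨hpair, _, _⟩
          have hc : c = (j : Int) - oc := (Prod.mk.injEq _ _ _ _ ▸ hpair).2
          omega
        rw [if_neg hcond, List.getElem?_set, if_neg h2]
    · simp only [h1, if_false]
      have hcond : ¬ (((r, c) : Int × Int) = ((i : Int) - or, (j : Int) - oc) ∧ (i : Int) < h ∧ (j : Int) < w) := by
        rintro ⟨hpair, _, _⟩
        have hr : r = (i : Int) - or := (Prod.mk.injEq _ _ _ _ ▸ hpair).1
        omega
      rw [if_neg hcond]
      cases init[i]? <;> rfl
  · rw [if_neg hg]
    have hcond : ¬ (((r, c) : Int × Int) = ((i : Int) - or, (j : Int) - oc) ∧ (i : Int) < h ∧ (j : Int) < w) := by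
      rintro ⟨hpair, hh, hw⟩
      have hr : r = (i : Int) - or := (Prod.mk.injEq _ _ _ _ ▸ hpair).1
      have hc : c = (j : Int) - oc := (Prod.mk.injEq _ _ _ _ ▸ hpair).2
      exact hg ⟨by omega, by omega, by omega, by omega⟩
    rw [if_neg hcond]

-- A's whole fold, read back pointwise: the unique possible writer of cell (i, j) is
-- (i - offset_r, j - offset_c), so membership of that pair decides the value.
theorem pvFoldA_cell (sg : List (List Int)) (or oc h w : Int) (cs : List (Int × Int)) (init : List (List Int))
    (i j : Nat) (hi : i < init.length) (hj : j < (init[i]?.getD []).length) :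
    pvCell (cs.foldl (pvStepA sg or oc h w) init) i j =
      if (((i : Int) - or, (j : Int) - oc) ∈ cs) ∧ (i : Int) < h ∧ (j : Int) < w then pvVal sg or oc i j
      else pvCell init i j := by
  induction cs generalizing init with
  | nil => simp
  | cons rc cs ih =>
    rw [List.foldl_cons]
    have hi' : i < (pvStepA sg or oc h w init rc).length := by rw [pvStepA_length]; exact hi
    have hj' : j < ((pvStepA sg or oc h w init rc)[i]?.getD []).length := by
      rw [pvStepA_row]; exact hj
    rw [ih _ hi' hj', pvStepA_cell sg or oc h w init rc i j hi hj]
    by_cases hm : (((i : Int) - or, (j : Int) - oc) ∈ cs) ∧ (i : Int) < h ∧ (j : Int) < w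
    · rw [if_pos hm, if_pos ⟨List.mem_cons_of_mem _ hm.1, hm.2⟩]
    · rw [if_neg hm]
      by_cases hq : rc = ((i : Int) - or, (j : Int) - oc) ∧ (i : Int) < h ∧ (j : Int) < w
      · rw [if_pos hq, if_pos ⟨hq.1 ▸ List.mem_cons_self, hq.2⟩]
      · rw [if_neg hq, if_neg]
        rintro ⟨hmem, hh, hw⟩
        rcases List.mem_cons.mp hmem with hEq | hIn
        · exact hq ⟨hEq.symm, hh, hw⟩
        · exact hm ⟨hIn, hh, hw⟩

-- ===== VERDICT (by name: the statement is the Claim_ definition above) =====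
theorem place_object_spec : Claim_equal_place_object := by
  intro grid component offset_r offset_c source_grid _ _
  unfold Spec_place_object place_object place_object_alt
  simp only [List.map_id']
  apply List.ext_getElem
  · rw [pvFoldA_length]; simp
  · intro i h1 h2
    have hi : i < grid.length := by rwa [pvFoldA_length] at h1
    have hrow : grid[i]?.getD [] = grid[i]'hi := by rw [List.getElem?_eq_getElem hi]; rfl
    apply List.ext_getElem
    · have := pvFoldA_row source_grid offset_r offset_c (grid.length : Int) ((grid.headD []).length : Int) component grid i
      rw [List.getElem?_eq_getElem h1, Option.getD_some] at this
      rw [this, hrow]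
      simp [PySem.List.getElem_enumerate]
    · intro j hj1 hj2
      have hj : j < (grid[i]'hi).length := by
        have := pvFoldA_row source_grid offset_r offset_c (grid.length : Int) ((grid.headD []).length : Int) component grid i
        rw [List.getElem?_eq_getElem h1, Option.getD_some, hrow] at this
        rwa [this] at hj1
      have hLHS := pvFoldA_cell source_grid offset_r offset_c (grid.length : Int) ((grid.headD []).length : Int)
        component grid i j hi (by rw [hrow]; exact hj)
      rw [pvCell_eq _ i j h1 hj1, pvCell_eq _ i j hi hj] at hLHS
      rw [hLHS]
      simp only [List.getElem_map, PySem.List.getElem_enumerate]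
      have hih : (i : Int) < (grid.length : Int) := by exact_mod_cast hi
      by_cases hc : (((i : Int) - offset_r, (j : Int) - offset_c) ∈ component) ∧ (j : Int) < ((grid.headD []).length : Int)
      · rw [if_pos ⟨hc.1, hih, hc.2⟩, if_pos (by simp only [zero_add]; exact ⟨hc.2, hc.1⟩)]
        simp [pvVal]
      · rw [if_neg (by rintro ⟨hm, _, hw⟩; exact hc ⟨hm, hw⟩),
            if_neg (by simp only [zero_add]; rintro ⟨hw, hm⟩; exact hc ⟨hm, hw⟩)]
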